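-- pv_equiv track=rewrite | github.com/wuyehan/N.E.K.O | brain/task_executor.py | _extract_latest_user_intent
-- ===== SOURCE A (Python) =====
-- def _extract_latest_user_intent(conversation: str) -> str:
--     """Extract the latest user request from formatted conversation text."""
--     user_intent = ""
--     conv_lines = conversation.splitlines()
--     for line in conv_lines:
--         if line.startswith("LATEST_USER_REQUEST:"):
--             user_intent = line[len("LATEST_USER_REQUEST:"):].strip()
--             break
--
--     if not user_intent:
--         for line in reversed(conv_lines):
--             if line.startswith("user:") or line.startswith("User:"):
--                 user_intent = line[5:].strip()
--                 break
--     return user_intent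
-- ===== SOURCE B (Python) =====
-- def _extract_latest_user_intent(conversation: str) -> str:
--     """Extract the latest user request from formatted conversation text."""
--     latest = None
--     last_user = ""
--     for line in conversation.splitlines():
--         if latest is None and line.startswith("LATEST_USER_REQUEST:"):
--             latest = line[len("LATEST_USER_REQUEST:"):].strip()
--         elif line.startswith("user:") or line.startswith("User:"):
--             last_user = line[5:].strip()
--     return latest if latest else last_user
-- ===== Notes on version B (the rewrite author's own statement) =====
-- stated objective: simpler
-- what changed: Replaces A's two directional passes (forward scan for the first LATEST_USER_REQUEST line, then a reversed scan for the last user line) with one forward pass maintaining two accumulators and choosing between them at the end.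
import Mathlib
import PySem

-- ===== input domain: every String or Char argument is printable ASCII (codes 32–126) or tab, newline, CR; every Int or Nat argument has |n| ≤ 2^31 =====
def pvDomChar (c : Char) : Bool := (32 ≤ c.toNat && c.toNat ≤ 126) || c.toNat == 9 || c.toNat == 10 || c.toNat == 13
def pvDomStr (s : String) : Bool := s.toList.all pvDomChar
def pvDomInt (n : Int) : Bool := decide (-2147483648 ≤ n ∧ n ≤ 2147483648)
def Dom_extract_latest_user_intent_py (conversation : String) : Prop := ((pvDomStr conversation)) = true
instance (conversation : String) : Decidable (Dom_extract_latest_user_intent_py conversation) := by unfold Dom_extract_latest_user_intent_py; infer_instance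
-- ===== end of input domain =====

-- B replaces A's two directional passes (forward break-scan for the first LATEST_USER_REQUEST line,
-- then a reversed break-scan for the last user line) with ONE forward pass carrying two accumulators (simpler).

-- ===== PORT A =====
-- first loop of A: first line starting with "LATEST_USER_REQUEST:" (break), stripped tail; "" if none
def pvALoop1 : List String → String
  | [] => ""
  | l :: ls =>
      if PySem.Str.startswith l "LATEST_USER_REQUEST:" then
        PySem.Str.strip (PySem.Str.slice l (some 20) none)   -- line[len("LATEST_USER_REQUEST:"):].strip(), len = 20
      else pvALoop1 ls

-- second loop of A, run over the REVERSED line list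
def pvALoop2 : List String → String
  | [] => ""
  | l :: ls =>
      if PySem.Str.startswith l "user:" || PySem.Str.startswith l "User:" then
        PySem.Str.strip (PySem.Str.slice l (some 5) none)    -- line[5:].strip()
      else pvALoop2 ls

def extract_latest_user_intent_py (conversation : String) : String :=
  let conv_lines := PySem.Str.splitlines conversation
  let user_intent := pvALoop1 conv_lines
  if user_intent == "" then pvALoop2 conv_lines.reverse else user_intent

-- ===== PORT B =====
-- one step of B's single forward pass: state = (latest : Option String, last_user : String)
def pvBStep (st : Option String × String) (l : String) : Option String × String :=
  if st.1.isNone && PySem.Str.startswith l "LATEST_USER_REQUEST:" then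
    (some (PySem.Str.strip (PySem.Str.slice l (some 20) none)), st.2)
  else if PySem.Str.startswith l "user:" || PySem.Str.startswith l "User:" then
    (st.1, PySem.Str.strip (PySem.Str.slice l (some 5) none))
  else st

def extract_latest_user_intent_py_alt (conversation : String) : String :=
  let st := (PySem.Str.splitlines conversation).foldl pvBStep (none, "")
  match st.1 with                                   -- latest if latest else last_user
  | some v => if v == "" then st.2 else v
  | none => st.2

-- ===== PRECONDITION & SPEC =====
def Spec_extract_latest_user_intent_py (conversation : String) (out : String) : Prop := out = extract_latest_user_intent_py_alt conversation
instance (conversation : String) (out : String) : Decidable (Spec_extract_latest_user_intent_py conversation out) := by unfold Spec_extract_latest_user_intent_py; infer_instance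

-- ===== CLAIM (what is proved, stated in full; the proofs are below) =====
def Claim_equal_extract_latest_user_intent_py : Prop := ∀ (conversation : String), Dom_extract_latest_user_intent_py conversation → Spec_extract_latest_user_intent_py conversation (extract_latest_user_intent_py conversation)

-- ===== LEMMAS AND PROOFS =====

-- proof-only views of the two accumulators of B's pass
def pvUStep (lu : String) (l : String) : String :=
  if PySem.Str.startswith l "user:" || PySem.Str.startswith l "User:" then
    PySem.Str.strip (PySem.Str.slice l (some 5) none)
  else lu

def pvFirstLatest : List String → Option String
  | [] => none
  | l :: ls =>
      if PySem.Str.startswith l "LATEST_USER_REQUEST:" then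
        some (PySem.Str.strip (PySem.Str.slice l (some 20) none))
      else pvFirstLatest ls

-- a LATEST_USER_REQUEST: line starts with neither "user:" nor "User:"
lemma pv_disjoint (l : String)
    (h : PySem.Str.startswith l "LATEST_USER_REQUEST:" = true) :
    (PySem.Str.startswith l "user:" || PySem.Str.startswith l "User:") = false := by
  simp only [PySem.Str.startswith_eq, PySem.Chars.startswith_iff] at h ⊢
  obtain ⟨t, ht⟩ := h
  have e2 : "LATEST_USER_REQUEST:".toList
      = 'L'::'A'::'T'::'E'::'S'::'T'::'_'::'U'::'S'::'E'::'R'::'_'::'R'::'E'::'Q'::'U'::'E'::'S'::'T'::':'::[] := rfl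
  rw [Bool.or_eq_false_iff]
  constructor <;>
  · rw [← Bool.not_eq_true, PySem.Chars.startswith_iff]
    rintro ⟨t2, ht2⟩
    have hc := ht2.trans ht.symm
    rw [e2] at hc
    simp [show "user:".toList = 'u'::'s'::'e'::'r'::':'::[] from rfl,
      show "User:".toList = 'U'::'s'::'e'::'r'::':'::[] from rfl] at hc

lemma pv_foldl_some (lines : List String) (v : String) (lu : String) :
    lines.foldl pvBStep (some v, lu) = (some v, lines.foldl pvUStep lu) := by
  induction lines generalizing lu with
  | nil => rfl
  | cons l ls ih =>
      have : pvBStep (some v, lu) l = (some v, pvUStep lu l) := by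
        simp only [pvBStep, pvUStep]
        split_ifs <;> simp_all
      simp only [List.foldl_cons, this, ih]

lemma pv_foldl_none (lines : List String) (lu : String) :
    lines.foldl pvBStep (none, lu) = (pvFirstLatest lines, lines.foldl pvUStep lu) := by
  induction lines generalizing lu with
  | nil => rfl
  | cons l ls ih =>
      by_cases hL : PySem.Str.startswith l "LATEST_USER_REQUEST:" = true
      · have hstep : pvBStep (none, lu) l
            = (some (PySem.Str.strip (PySem.Str.slice l (some 20) none)), lu) := by
          simp only [pvBStep, Option.isNone_none, Bool.true_and, hL, if_true]
        have hu : pvUStep lu l = lu := by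
          simp only [pvUStep, pv_disjoint l hL, Bool.false_eq_true, if_false]
        rw [List.foldl_cons, hstep, pv_foldl_some]
        simp only [pvFirstLatest, hL, if_true, List.foldl_cons, hu]
      · rw [Bool.not_eq_true] at hL
        have hstep : pvBStep (none, lu) l = (none, pvUStep lu l) := by
          simp only [pvBStep, pvUStep, Option.isNone_none, Bool.true_and, hL, Bool.false_eq_true,
            if_false]
          split_ifs <;> rfl
        rw [List.foldl_cons, hstep, ih]
        simp only [pvFirstLatest, hL, Bool.false_eq_true, if_false, List.foldl_cons]

lemma pv_aLoop1_eq (lines : List String) :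
    pvALoop1 lines = (pvFirstLatest lines).getD "" := by
  induction lines with
  | nil => rfl
  | cons l ls ih =>
      simp only [pvALoop1, pvFirstLatest]
      split_ifs <;> simp [ih]

lemma pv_aLoop2_reverse (lines : List String) :
    pvALoop2 lines.reverse = lines.foldl pvUStep "" := by
  induction lines using List.reverseRecOn with
  | nil => rfl
  | append_singleton ls l ih =>
      rw [List.reverse_append, List.foldl_append]
      simp only [List.reverse_singleton, List.singleton_append, pvALoop2, List.foldl_cons,
        List.foldl_nil, pvUStep]
      split_ifs <;> simp [ih]

-- ===== VERDICT (by name: the statement is the Claim_ definition above) =====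
theorem extract_latest_user_intent_py_spec : Claim_equal_extract_latest_user_intent_py := by
  intro conversation _
  unfold Spec_extract_latest_user_intent_py extract_latest_user_intent_py
    extract_latest_user_intent_py_alt
  dsimp only
  rw [pv_foldl_none, pv_aLoop1_eq, pv_aLoop2_reverse]
  cases h : pvFirstLatest (PySem.Str.splitlines conversation) with
  | none => simp
  | some v =>
      simp only [Option.getD_some]
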